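-- pv_equiv track=rewrite | github.com/DaniDotExe/Modelado1 | delete_abstract.py | remove_abstract_fields
-- ===== SOURCE A (Python) =====
-- def remove_abstract_fields(content: str) -> str:
-- 	"""Return the BibTeX content without any `abstract` fields."""
--
-- 	lines = content.splitlines(keepends=True)
-- 	cleaned_lines: list[str] = []
-- 	skipping = False
-- 	brace_balance = 0
--
-- 	for line in lines:
-- 		if not skipping:
-- 			stripped = line.lstrip()
-- 			if stripped.lower().startswith("abstract") and "=" in stripped:
-- 				skipping = True
-- 				brace_balance = stripped.count("{") - stripped.count("}")
-- 				if brace_balance <= 0: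
-- 					skipping = False
-- 				continue
-- 		else:
-- 			brace_balance += line.count("{") - line.count("}")
-- 			if brace_balance <= 0:
-- 				skipping = False
-- 			continue
--
-- 		cleaned_lines.append(line)
--
-- 	return "".join(cleaned_lines)
-- ===== SOURCE B (Python) =====
-- def remove_abstract_fields(content: str) -> str:
--     """Return the BibTeX content without any `abstract` fields."""
--     n = len(content)
--
--     def line_end(k: int) -> int:
--         while k < n:
--             if content[k] == "\n":
--                 return k + 1
--             if content[k] == "\r":
--                 return k + 2 if k + 1 < n and content[k + 1] == "\n" else k + 1
--             k += 1
--         return k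
--
--     # Stage 1: locate the character spans [start, end) occupied by abstract fields.
--     spans: list[tuple[int, int]] = []
--     i = 0
--     while i < n:
--         j = line_end(i)
--         s = content[i:j].lstrip()
--         if s.lower().startswith("abstract") and "=" in s:
--             bal = s.count("{") - s.count("}")
--             k = j
--             while bal > 0 and k < n:
--                 e = line_end(k)
--                 bal += content[k:e].count("{") - content[k:e].count("}")
--                 k = e
--             spans.append((i, k))
--             i = k
--         else:
--             i = j
--
--     # Stage 2: excise those spans: join the complementary slices of the original.
--     parts: list[str] = []
--     prev = 0
--     for a, b in spans:
--         parts.append(content[prev:a])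
--         prev = b
--     parts.append(content[prev:])
--     return "".join(parts)
-- ===== Notes on version B (the rewrite author's own statement) =====
-- stated objective: alternative
-- what changed: A splits the content into a list of lines and filters it with a flag-plus-balance state machine collecting the kept lines; B never builds a line list: it scans character offsets over the raw string to compute the [start,end) spans occupied by abstract fields, then reconstructs the output by slicing and joining the complement of those spans.
import Mathlib
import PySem

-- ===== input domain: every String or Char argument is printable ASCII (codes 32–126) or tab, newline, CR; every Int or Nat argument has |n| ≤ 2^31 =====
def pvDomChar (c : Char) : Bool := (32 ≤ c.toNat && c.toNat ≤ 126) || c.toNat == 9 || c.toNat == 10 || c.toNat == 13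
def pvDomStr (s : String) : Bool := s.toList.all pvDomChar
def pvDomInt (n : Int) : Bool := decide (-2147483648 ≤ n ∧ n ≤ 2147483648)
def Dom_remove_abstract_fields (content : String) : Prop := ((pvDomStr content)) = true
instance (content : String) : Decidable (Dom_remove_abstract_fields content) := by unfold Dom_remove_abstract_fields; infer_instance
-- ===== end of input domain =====

-- B replaces A's line-list filter (split into lines, drop lines with a state machine) by a
-- span-based excision: compute the character spans [start, end) of the abstract fields over the
-- raw string, then join the complementary slices (objective: alternative; same cost).
-- Loops over indices are ported with an explicit fuel argument that only makes them total
-- (fuel = remaining length, always sufficient); this changes no computed value.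

-- ===== PORT A =====
-- hand port of str.splitlines(keepends=True): length of the first line including its terminator;
-- exact on the domain's line terminators '\n', '\r\n', '\r' (the only splitlines boundaries in Dom)
def pvLineLen : List Char → Nat
  | [] => 0
  | c :: r =>
    if c = '\n' then 1
    else if c = '\r' then (if r.head? = some '\n' then 2 else 1)
    else pvLineLen r + 1

def pvSplitKeepGo : Nat → List Char → List (List Char)
  | 0, _ => []
  | f + 1, l => if l = [] then [] else l.take (pvLineLen l) :: pvSplitKeepGo f (l.drop (pvLineLen l))

def pvSplitKeep (l : List Char) : List (List Char) := pvSplitKeepGo l.length l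

-- A's for-loop over the lines, carrying (skipping, brace_balance); result = cleaned_lines.
def pvAGo : List (List Char) → Bool → Int → List (List Char)
  | [], _, _ => []
  | line :: rest, skipping, bal =>
    if !skipping then
      let stripped := PySem.Chars.lstrip line
      if PySem.Chars.startswith (PySem.Chars.lower stripped) ['a','b','s','t','r','a','c','t']
          && PySem.Chars.isIn ['='] stripped then
        let b : Int := (PySem.Chars.count stripped ['{'] : Int) - (PySem.Chars.count stripped ['}'] : Int)
        if b ≤ 0 then pvAGo rest false b else pvAGo rest true b
      else
        line :: pvAGo rest skipping bal
    else
      let b : Int := bal + ((PySem.Chars.count line ['{'] : Int) - (PySem.Chars.count line ['}'] : Int))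
      if b ≤ 0 then pvAGo rest false b else pvAGo rest true b

def remove_abstract_fields (content : String) : String :=
  String.ofList (PySem.Chars.join [] (pvAGo (pvSplitKeep content.toList) false 0))

-- ===== PORT B =====
-- content[a:b] for the in-range indices 0 ≤ a ≤ b ≤ len(content) B uses (exact there)
def pvSlice (cs : List Char) (a b : Nat) : List Char := (cs.drop a).take (b - a)

-- Source B's line_end: scan forward from k to the index just past this line's terminator
def pvLineEndGo (cs : List Char) : Nat → Nat → Nat
  | 0, k => k
  | f + 1, k =>
    if h : k < cs.length then
      if cs[k] = '\n' then k + 1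
      else if cs[k] = '\r' then
        if h2 : k + 1 < cs.length then (if cs[k + 1] = '\n' then k + 2 else k + 1) else k + 1
      else pvLineEndGo cs f (k + 1)
    else k

def pvLineEnd (cs : List Char) (k : Nat) : Nat := pvLineEndGo cs (cs.length - k) k

-- Source B's inner while loop: advance k line by line, accumulating the brace balance, while bal > 0
def pvBodyEndGo (cs : List Char) : Nat → Int → Nat → Nat
  | 0, _, k => k
  | f + 1, bal, k =>
    if 0 < bal ∧ k < cs.length then
      pvBodyEndGo cs f
        (bal + ((PySem.Chars.count (pvSlice cs k (pvLineEnd cs k)) ['{'] : Int)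
                - (PySem.Chars.count (pvSlice cs k (pvLineEnd cs k)) ['}'] : Int)))
        (pvLineEnd cs k)
    else k

def pvBodyEnd (cs : List Char) (bal : Int) (k : Nat) : Nat := pvBodyEndGo cs (cs.length - k) bal k

-- Source B's outer while loop: collect the [start, end) spans of abstract fields
def pvSpansGo (cs : List Char) : Nat → Nat → List (Nat × Nat)
  | 0, _ => []
  | f + 1, i =>
    if i < cs.length then
      let s := PySem.Chars.lstrip (pvSlice cs i (pvLineEnd cs i))
      if PySem.Chars.startswith (PySem.Chars.lower s) ['a','b','s','t','r','a','c','t']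
          && PySem.Chars.isIn ['='] s then
        (i, pvBodyEnd cs ((PySem.Chars.count s ['{'] : Int) - (PySem.Chars.count s ['}'] : Int)) (pvLineEnd cs i)) ::
          pvSpansGo cs f (pvBodyEnd cs ((PySem.Chars.count s ['{'] : Int) - (PySem.Chars.count s ['}'] : Int)) (pvLineEnd cs i))
      else pvSpansGo cs f (pvLineEnd cs i)
    else []

def pvSpans (cs : List Char) (i : Nat) : List (Nat × Nat) := pvSpansGo cs (cs.length - i) i

-- Source B's stage 2: the complementary slices, ending with content[prev:]
def pvParts (cs : List Char) (prev : Nat) : List (Nat × Nat) → List (List Char)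
  | [] => [pvSlice cs prev cs.length]
  | (a, b) :: rest => pvSlice cs prev a :: pvParts cs b rest

def remove_abstract_fields_alt (content : String) : String :=
  String.ofList (PySem.Chars.join [] (pvParts content.toList 0 (pvSpans content.toList 0)))

-- ===== PRECONDITION & SPEC =====
def Spec_remove_abstract_fields (content : String) (out : String) : Prop := out = remove_abstract_fields_alt content
instance (content : String) (out : String) : Decidable (Spec_remove_abstract_fields content out) := by unfold Spec_remove_abstract_fields; infer_instance

-- ===== CLAIM (what is proved, stated in full; the proofs are below) =====
def Claim_equal_remove_abstract_fields : Prop := ∀ (content : String), Dom_remove_abstract_fields content → Spec_remove_abstract_fields content (remove_abstract_fields content)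

-- ===== LEMMAS AND PROOFS =====
theorem join_nil_flatten (l : List (List Char)) : PySem.Chars.join [] l = l.flatten := by
  induction l with
  | nil => rfl
  | cons x xs ih =>
    cases xs with
    | nil => simp [PySem.Chars.join, List.intercalate]
    | cons y ys =>
      simp only [PySem.Chars.join, List.intercalate] at *
      simp [List.intersperse, ih]

theorem pvLineLen_pos (l : List Char) (h : l ≠ []) : 0 < pvLineLen l := by
  cases l with
  | nil => exact absurd rfl h
  | cons c r => simp only [pvLineLen]; split_ifs <;> omega

theorem pvLineLen_le (l : List Char) : pvLineLen l ≤ l.length := by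
  induction l with
  | nil => simp [pvLineLen]
  | cons c r ih =>
    simp only [pvLineLen, List.length_cons]
    split_ifs <;> try omega
    cases r <;> simp_all

-- evaluation rules for pvLineLen on a cons
theorem pvLineLen_nl (r : List Char) : pvLineLen ('\n' :: r) = 1 := by simp [pvLineLen]
theorem pvLineLen_crnl (r : List Char) : pvLineLen ('\r' :: '\n' :: r) = 2 := by simp [pvLineLen]
theorem pvLineLen_cr_nil : pvLineLen ['\r'] = 1 := by simp [pvLineLen]
theorem pvLineLen_cr (c : Char) (r : List Char) (h : c ≠ '\n') :
    pvLineLen ('\r' :: c :: r) = 1 := by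
  simp [pvLineLen, h]
theorem pvLineLen_other (c : Char) (r : List Char) (h1 : c ≠ '\n') (h2 : c ≠ '\r') :
    pvLineLen (c :: r) = pvLineLen r + 1 := by
  simp [pvLineLen, h1, h2]

-- pvLineEnd k computed over the whole string = k plus the first-line length of the suffix
theorem pvLineEndGo_eq (cs : List Char) : ∀ (f k : Nat), cs.length - k ≤ f → k ≤ cs.length →
    pvLineEndGo cs f k = k + pvLineLen (cs.drop k) := by
  intro f
  induction f with
  | zero =>
    intro k h1 h2
    have hk : k = cs.length := by omega
    simp [pvLineEndGo, hk, pvLineLen]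
  | succ f ih =>
    intro k h1 h2
    by_cases hk : k < cs.length
    · have hdrop : cs[k] :: cs.drop (k + 1) = cs.drop k := List.getElem_cons_drop hk
      simp only [pvLineEndGo, hk, dif_pos]
      split_ifs with hn hr h2' h3
      · rw [← hdrop, hn, pvLineLen_nl]
      · have hd1 : cs[k + 1] :: cs.drop (k + 2) = cs.drop (k + 1) := List.getElem_cons_drop h2'
        rw [← hdrop, ← hd1, hr, h3, pvLineLen_crnl]
      · have hd1 : cs[k + 1] :: cs.drop (k + 2) = cs.drop (k + 1) := List.getElem_cons_drop h2'
        rw [← hdrop, ← hd1, hr, pvLineLen_cr _ _ h3]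
      · have hd2 : cs.drop (k + 1) = [] := List.drop_eq_nil_of_le (by omega)
        rw [← hdrop, hd2, hr, pvLineLen_cr_nil]
      · rw [← hdrop, pvLineLen_other _ _ hn hr, ih (k + 1) (by omega) (by omega)]
        omega
    · have hk' : k = cs.length := by omega
      simp [pvLineEndGo, hk, hk', pvLineLen]

theorem pvLineEnd_eq (cs : List Char) (k : Nat) (h : k ≤ cs.length) :
    pvLineEnd cs k = k + pvLineLen (cs.drop k) :=
  pvLineEndGo_eq cs (cs.length - k) k (by omega) h

theorem pvLineEnd_gt (cs : List Char) (k : Nat) (h : k < cs.length) : k < pvLineEnd cs k := by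
  rw [pvLineEnd_eq cs k (by omega)]
  have hne : cs.drop k ≠ [] := by
    intro he
    have := List.length_drop (l := cs) (i := k)
    rw [he] at this
    simp at this
    omega
  have := pvLineLen_pos (cs.drop k) hne
  omega

theorem pvLineEnd_ge (cs : List Char) (k : Nat) : k ≤ pvLineEnd cs k := by
  by_cases h : k < cs.length
  · exact Nat.le_of_lt (pvLineEnd_gt cs k h)
  · have h0 : cs.length - k = 0 := by omega
    unfold pvLineEnd
    rw [h0]
    simp [pvLineEndGo]

theorem pvLineEnd_le (cs : List Char) (k : Nat) (h : k ≤ cs.length) :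
    pvLineEnd cs k ≤ cs.length := by
  rw [pvLineEnd_eq cs k h]
  have h1 := pvLineLen_le (cs.drop k)
  simp only [List.length_drop] at h1
  omega

-- pvBodyEnd never moves backwards, and never runs past the end of the string
theorem pvBodyEndGo_ge (cs : List Char) : ∀ (f : Nat) (bal : Int) (k : Nat),
    k ≤ pvBodyEndGo cs f bal k := by
  intro f
  induction f with
  | zero => intro bal k; simp [pvBodyEndGo]
  | succ f ih =>
    intro bal k
    simp only [pvBodyEndGo]
    split_ifs with h
    · have h1 := pvLineEnd_ge cs k
      have h2 := ih (bal + ((PySem.Chars.count (pvSlice cs k (pvLineEnd cs k)) ['{'] : Int)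
                - (PySem.Chars.count (pvSlice cs k (pvLineEnd cs k)) ['}'] : Int))) (pvLineEnd cs k)
      omega
    · omega

theorem pvBodyEnd_ge (cs : List Char) (bal : Int) (k : Nat) : k ≤ pvBodyEnd cs bal k :=
  pvBodyEndGo_ge cs (cs.length - k) bal k

theorem pvBodyEndGo_le (cs : List Char) : ∀ (f : Nat) (bal : Int) (k : Nat), k ≤ cs.length →
    pvBodyEndGo cs f bal k ≤ cs.length := by
  intro f
  induction f with
  | zero => intro bal k h; simpa [pvBodyEndGo]
  | succ f ih =>
    intro bal k h
    simp only [pvBodyEndGo]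
    split_ifs with hc
    · exact ih _ (pvLineEnd cs k) (pvLineEnd_le cs k h)
    · exact h

theorem pvBodyEnd_le (cs : List Char) (bal : Int) (k : Nat) (h : k ≤ cs.length) :
    pvBodyEnd cs bal k ≤ cs.length :=
  pvBodyEndGo_le cs (cs.length - k) bal k h

-- splitting one line off the front of the suffix's splitlines
theorem pvSplitKeepGo_congr : ∀ (f f' : Nat) (l : List Char), l.length ≤ f → l.length ≤ f' →
    pvSplitKeepGo f l = pvSplitKeepGo f' l := by
  intro f
  induction f with
  | zero =>
    intro f' l h1 h2
    have : l = [] := List.length_eq_zero_iff.mp (by omega)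
    subst this
    cases f' <;> simp [pvSplitKeepGo]
  | succ f ih =>
    intro f' l h1 h2
    cases f' with
    | zero =>
      have : l = [] := List.length_eq_zero_iff.mp (by omega)
      subst this
      simp [pvSplitKeepGo]
    | succ f' =>
      by_cases hl : l = []
      · simp [pvSplitKeepGo, hl]
      · simp only [pvSplitKeepGo, hl, if_neg, reduceCtorEq]
        have hp := pvLineLen_pos l hl
        have : (l.drop (pvLineLen l)).length ≤ f := by
          simp only [List.length_drop]; omega
        have h' : (l.drop (pvLineLen l)).length ≤ f' := by
          simp only [List.length_drop]; omega
        rw [ih f' _ this h']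

theorem splitKeep_step (cs : List Char) (i : Nat) (h : i < cs.length) :
    pvSplitKeep (cs.drop i) =
      pvSlice cs i (pvLineEnd cs i) :: pvSplitKeep (cs.drop (pvLineEnd cs i)) := by
  have hne : cs.drop i ≠ [] := by
    intro he
    have := List.length_drop (l := cs) (i := i)
    rw [he] at this
    simp at this
    omega
  have hlen : pvLineEnd cs i = i + pvLineLen (cs.drop i) := pvLineEnd_eq cs i (by omega)
  unfold pvSplitKeep
  have hl : (cs.drop i).length = ((cs.drop i).length - 1) + 1 := by
    have := List.length_pos_iff.mpr hne
    omega
  rw [hl]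
  simp only [pvSplitKeepGo, hne, if_neg, reduceCtorEq]
  have h1 : pvSlice cs i (pvLineEnd cs i) = (cs.drop i).take (pvLineLen (cs.drop i)) := by
    simp [pvSlice, hlen]
  have h2 : cs.drop (pvLineEnd cs i) = (cs.drop i).drop (pvLineLen (cs.drop i)) := by
    rw [List.drop_drop, hlen, Nat.add_comm]
  rw [h1, h2]
  have hp := pvLineLen_pos (cs.drop i) hne
  have hll := pvLineLen_le (cs.drop i)
  have h3 : pvSplitKeepGo ((cs.drop i).length - 1) ((cs.drop i).drop (pvLineLen (cs.drop i))) =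
      pvSplitKeepGo ((cs.drop i).drop (pvLineLen (cs.drop i))).length
        ((cs.drop i).drop (pvLineLen (cs.drop i))) :=
    pvSplitKeepGo_congr ((cs.drop i).length - 1) ((cs.drop i).drop (pvLineLen (cs.drop i))).length
      ((cs.drop i).drop (pvLineLen (cs.drop i)))
      (by simp only [List.length_drop]; omega) (by omega)
  rw [h3]
  simp

-- in the non-skipping state A never reads the carried balance
theorem pvAGo_false (ls : List (List Char)) : ∀ (b b' : Int),
    pvAGo ls false b = pvAGo ls false b' := by
  induction ls with
  | nil => intro b b'; rfl
  | cons line rest ih =>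
    intro b b'
    simp only [pvAGo, Bool.not_false, if_true]
    split_ifs with hc hb
    · rfl
    · rfl
    · rw [ih b b']

-- a slice splits at any intermediate index
theorem pvSlice_split (cs : List Char) (i j a : Nat) (h1 : i ≤ j) (h2 : j ≤ a) :
    pvSlice cs i a = pvSlice cs i j ++ pvSlice cs j a := by
  unfold pvSlice
  have : a - i = (j - i) + (a - j) := by omega
  rw [this, List.take_add, List.drop_drop]
  have : i + (j - i) = j := by omega
  rw [this]

-- every span produced from position i starts at or after i
theorem pvSpansGo_lb (cs : List Char) : ∀ (f i : Nat), ∀ p ∈ pvSpansGo cs f i, i ≤ p.1 := by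
  intro f
  induction f with
  | zero => intro i p hp; simp [pvSpansGo] at hp
  | succ f ih =>
    intro i p hp
    simp only [pvSpansGo] at hp
    split_ifs at hp with h hc
    · simp only [List.mem_cons] at hp
      rcases hp with hp | hp
      · rw [hp]
      · have hj := pvLineEnd_gt cs i h
        have hk := pvBodyEnd_ge cs ((PySem.Chars.count (PySem.Chars.lstrip (pvSlice cs i (pvLineEnd cs i))) ['{'] : Int) - (PySem.Chars.count (PySem.Chars.lstrip (pvSlice cs i (pvLineEnd cs i))) ['}'] : Int)) (pvLineEnd cs i)
        have := ih _ p hp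
        omega
    · have hj := pvLineEnd_gt cs i h
      have := ih _ p hp
      omega
    · simp at hp

-- moving the rebuild anchor from j back to i prepends the kept slice [i, j)
theorem pvParts_shift (cs : List Char) (i j : Nat) (spans : List (Nat × Nat))
    (hij : i ≤ j) (hjn : j ≤ cs.length) (hlb : ∀ p ∈ spans, j ≤ p.1) :
    (pvParts cs i spans).flatten = pvSlice cs i j ++ (pvParts cs j spans).flatten := by
  cases spans with
  | nil => simp [pvParts, pvSlice_split cs i j cs.length hij hjn]
  | cons p rest =>
    obtain ⟨a, b⟩ := p
    have ha : j ≤ a := hlb (a, b) (by simp)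
    simp [pvParts, pvSlice_split cs i j a hij ha]

-- skipping state: A consumes exactly the lines up to pvBodyEnd, then is back in normal state
theorem pvBodyGo_eq (cs : List Char) : ∀ (f : Nat) (j : Nat) (bal : Int), 0 < bal →
    cs.length - j ≤ f → j ≤ cs.length →
    pvAGo (pvSplitKeep (cs.drop j)) true bal =
      pvAGo (pvSplitKeep (cs.drop (pvBodyEndGo cs f bal j))) false 0 := by
  intro f
  induction f with
  | zero =>
    intro j bal hb h1 h2
    have hj : j = cs.length := by omega
    subst hj
    simp [pvBodyEndGo, pvSplitKeep, pvSplitKeepGo, pvAGo]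
  | succ f ih =>
    intro j bal hb h1 h2
    by_cases hj : j < cs.length
    · have hgt := pvLineEnd_gt cs j hj
      have hle := pvLineEnd_le cs j (by omega)
      rw [splitKeep_step cs j hj]
      simp only [pvBodyEndGo, hb, hj, and_self, if_pos]
      simp only [pvAGo, Bool.not_true, Bool.false_eq_true, if_false]
      by_cases hb' : bal + ((PySem.Chars.count (pvSlice cs j (pvLineEnd cs j)) ['{'] : Int)
          - (PySem.Chars.count (pvSlice cs j (pvLineEnd cs j)) ['}'] : Int)) ≤ 0
      · rw [if_pos hb']
        have hfe : pvBodyEndGo cs f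
            (bal + ((PySem.Chars.count (pvSlice cs j (pvLineEnd cs j)) ['{'] : Int)
              - (PySem.Chars.count (pvSlice cs j (pvLineEnd cs j)) ['}'] : Int)))
            (pvLineEnd cs j) = pvLineEnd cs j := by
          cases f with
          | zero => simp [pvBodyEndGo]
          | succ f =>
            simp only [pvBodyEndGo]
            rw [if_neg]
            intro hx
            omega
        rw [hfe]
        exact pvAGo_false _ _ 0
      · rw [if_neg hb']
        exact ih (pvLineEnd cs j) _ (by omega) (by omega) (by omega)
    · have hj' : j = cs.length := by omega
      subst hj'
      cases f with
      | zero => simp [pvBodyEndGo, pvSplitKeep, pvSplitKeepGo, pvAGo]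
      | succ f =>
        simp only [pvBodyEndGo]
        rw [if_neg (by intro hx; omega)]
        simp [pvSplitKeep, pvSplitKeepGo, pvAGo]

theorem pvBody_eq (cs : List Char) (j : Nat) (bal : Int) (hb : 0 < bal) (h2 : j ≤ cs.length) :
    pvAGo (pvSplitKeep (cs.drop j)) true bal =
      pvAGo (pvSplitKeep (cs.drop (pvBodyEnd cs bal j))) false 0 :=
  pvBodyGo_eq cs (cs.length - j) j bal hb (by omega) h2

-- main correspondence: from any position i, the excised rebuild equals A's kept lines
theorem pvMain (cs : List Char) : ∀ (f i : Nat), cs.length - i ≤ f → i ≤ cs.length →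
    (pvParts cs i (pvSpansGo cs f i)).flatten =
      (pvAGo (pvSplitKeep (cs.drop i)) false 0).flatten := by
  intro f
  induction f with
  | zero =>
    intro i h1 h2
    have hi : i = cs.length := by omega
    subst hi
    simp [pvSpansGo, pvParts, pvSlice, pvSplitKeep, pvSplitKeepGo, pvAGo]
  | succ f ih =>
    intro i h1 h2
    by_cases hi : i < cs.length
    · have hgt := pvLineEnd_gt cs i hi
      have hle := pvLineEnd_le cs i (by omega)
      simp only [pvSpansGo, hi, if_pos]
      rw [splitKeep_step cs i hi]
      simp only [pvAGo, Bool.not_false, if_true]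
      by_cases hc : (PySem.Chars.startswith (PySem.Chars.lower (PySem.Chars.lstrip (pvSlice cs i (pvLineEnd cs i)))) ['a','b','s','t','r','a','c','t'] && PySem.Chars.isIn ['='] (PySem.Chars.lstrip (pvSlice cs i (pvLineEnd cs i)))) = true
      · rw [if_pos hc, if_pos hc]
        have hkge : pvLineEnd cs i ≤ pvBodyEnd cs (((PySem.Chars.count (PySem.Chars.lstrip (pvSlice cs i (pvLineEnd cs i))) ['{'] : Int) - (PySem.Chars.count (PySem.Chars.lstrip (pvSlice cs i (pvLineEnd cs i))) ['}'] : Int))) (pvLineEnd cs i) :=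
          pvBodyEnd_ge cs (((PySem.Chars.count (PySem.Chars.lstrip (pvSlice cs i (pvLineEnd cs i))) ['{'] : Int) - (PySem.Chars.count (PySem.Chars.lstrip (pvSlice cs i (pvLineEnd cs i))) ['}'] : Int))) (pvLineEnd cs i)
        have hkle : pvBodyEnd cs (((PySem.Chars.count (PySem.Chars.lstrip (pvSlice cs i (pvLineEnd cs i))) ['{'] : Int) - (PySem.Chars.count (PySem.Chars.lstrip (pvSlice cs i (pvLineEnd cs i))) ['}'] : Int))) (pvLineEnd cs i) ≤ cs.length :=
          pvBodyEnd_le cs (((PySem.Chars.count (PySem.Chars.lstrip (pvSlice cs i (pvLineEnd cs i))) ['{'] : Int) - (PySem.Chars.count (PySem.Chars.lstrip (pvSlice cs i (pvLineEnd cs i))) ['}'] : Int))) (pvLineEnd cs i) (by omega)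
        have hrebuild : (pvParts cs i ((i, pvBodyEnd cs (((PySem.Chars.count (PySem.Chars.lstrip (pvSlice cs i (pvLineEnd cs i))) ['{'] : Int) - (PySem.Chars.count (PySem.Chars.lstrip (pvSlice cs i (pvLineEnd cs i))) ['}'] : Int))) (pvLineEnd cs i)) ::
            pvSpansGo cs f (pvBodyEnd cs (((PySem.Chars.count (PySem.Chars.lstrip (pvSlice cs i (pvLineEnd cs i))) ['{'] : Int) - (PySem.Chars.count (PySem.Chars.lstrip (pvSlice cs i (pvLineEnd cs i))) ['}'] : Int))) (pvLineEnd cs i)))).flatten =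
            (pvParts cs (pvBodyEnd cs (((PySem.Chars.count (PySem.Chars.lstrip (pvSlice cs i (pvLineEnd cs i))) ['{'] : Int) - (PySem.Chars.count (PySem.Chars.lstrip (pvSlice cs i (pvLineEnd cs i))) ['}'] : Int))) (pvLineEnd cs i))
              (pvSpansGo cs f (pvBodyEnd cs (((PySem.Chars.count (PySem.Chars.lstrip (pvSlice cs i (pvLineEnd cs i))) ['{'] : Int) - (PySem.Chars.count (PySem.Chars.lstrip (pvSlice cs i (pvLineEnd cs i))) ['}'] : Int))) (pvLineEnd cs i)))).flatten := by
          simp [pvParts, pvSlice]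
        rw [hrebuild]
        by_cases hb0 : (((PySem.Chars.count (PySem.Chars.lstrip (pvSlice cs i (pvLineEnd cs i))) ['{'] : Int) - (PySem.Chars.count (PySem.Chars.lstrip (pvSlice cs i (pvLineEnd cs i))) ['}'] : Int))) ≤ 0
        · rw [if_pos hb0]
          have hk0 : pvBodyEnd cs (((PySem.Chars.count (PySem.Chars.lstrip (pvSlice cs i (pvLineEnd cs i))) ['{'] : Int) - (PySem.Chars.count (PySem.Chars.lstrip (pvSlice cs i (pvLineEnd cs i))) ['}'] : Int))) (pvLineEnd cs i) = pvLineEnd cs i := by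
            unfold pvBodyEnd
            cases hv : cs.length - pvLineEnd cs i with
            | zero => simp [pvBodyEndGo]
            | succ g =>
              simp only [pvBodyEndGo]
              rw [if_neg (by intro hx; omega)]
          rw [hk0, pvAGo_false _ _ 0]
          exact ih (pvLineEnd cs i) (by omega) (by omega)
        · rw [if_neg hb0]
          rw [pvBody_eq cs (pvLineEnd cs i) (((PySem.Chars.count (PySem.Chars.lstrip (pvSlice cs i (pvLineEnd cs i))) ['{'] : Int) - (PySem.Chars.count (PySem.Chars.lstrip (pvSlice cs i (pvLineEnd cs i))) ['}'] : Int))) (by omega) (by omega)]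
          exact ih (pvBodyEnd cs (((PySem.Chars.count (PySem.Chars.lstrip (pvSlice cs i (pvLineEnd cs i))) ['{'] : Int) - (PySem.Chars.count (PySem.Chars.lstrip (pvSlice cs i (pvLineEnd cs i))) ['}'] : Int))) (pvLineEnd cs i)) (by omega) hkle
      · rw [if_neg hc, if_neg hc]
        rw [pvParts_shift cs i (pvLineEnd cs i) (pvSpansGo cs f (pvLineEnd cs i)) (by omega) (by omega)
              (pvSpansGo_lb cs f (pvLineEnd cs i))]
        simp only [List.flatten_cons]
        rw [ih (pvLineEnd cs i) (by omega) (by omega)]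
    · have hi' : i = cs.length := by omega
      subst hi'
      simp [pvSpansGo, pvParts, pvSlice, pvSplitKeep, pvSplitKeepGo, pvAGo]

-- ===== VERDICT (by name: the statement is the Claim_ definition above) =====
theorem remove_abstract_fields_spec : Claim_equal_remove_abstract_fields := by
  intro content _
  unfold Spec_remove_abstract_fields remove_abstract_fields remove_abstract_fields_alt
  rw [join_nil_flatten, join_nil_flatten]
  have h := pvMain content.toList content.toList.length 0 (by omega) (by omega)
  rw [List.drop_zero] at h
  unfold pvSpans
  rw [Nat.sub_zero, ← h]
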